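-- pv_equiv track=rewrite | github.com/evilfps/bigbrightpaints-erp | scripts/rag/impact.py | guard_recommendations
-- ===== SOURCE A (Python) =====
-- from typing import Any, Dict, List, Set, Tuple
--
-- def guard_recommendations(modules: List[str]) -> List[str]:
--     checks = ["bash ci/check-architecture.sh", "bash ci/check-enterprise-policy.sh"]
--     if any(module in {"auth", "rbac", "company"} for module in modules):
--         checks.append("bash ci/check-orchestrator-layer.sh")
--     if any(module in {"accounting", "inventory", "invoice", "purchasing"} for module in modules):
--         checks.append("bash scripts/gate_reconciliation.sh")
--     if any(module in {"orchestrator", "production", "factory"} for module in modules):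
--         checks.append("bash scripts/gate_core.sh")
--     checks.append("bash scripts/gate_fast.sh")
--
--     deduped = []
--     seen = set()
--     for check in checks:
--         if check in seen:
--             continue
--         seen.add(check)
--         deduped.append(check)
--     return deduped
-- ===== SOURCE B (Python) =====
-- # Inverted index: one pass over modules marking hit rules via a module->rule-index dict;
-- # no dedup pass is needed because the six check strings are pairwise distinct.
-- _RULE_OF = {
--     "auth": 0, "rbac": 0, "company": 0,
--     "accounting": 1, "inventory": 1, "invoice": 1, "purchasing": 1,
--     "orchestrator": 2, "production": 2, "factory": 2,
-- }
-- _RULE_CHECK = [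
--     "bash ci/check-orchestrator-layer.sh",
--     "bash scripts/gate_reconciliation.sh",
--     "bash scripts/gate_core.sh",
-- ]
--
-- def guard_recommendations(modules):
--     hit = [False, False, False]
--     for m in modules:
--         i = _RULE_OF.get(m)
--         if i is not None:
--             hit[i] = True
--     out = ["bash ci/check-architecture.sh", "bash ci/check-enterprise-policy.sh"]
--     for h, c in zip(hit, _RULE_CHECK):
--         if h:
--             out.append(c)
--     out.append("bash scripts/gate_fast.sh")
--     return out
-- ===== Notes on version B (the rewrite author's own statement) =====
-- stated objective: alternative
-- what changed: Replaces A's three any()-scans over modules and the seen-set dedup loop with an inverted module-to-rule-index dict marked in a single pass over modules, then assembles the list directly with no dedup pass (the six check strings are pairwise distinct, so duplicates never arise).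
import Mathlib
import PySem

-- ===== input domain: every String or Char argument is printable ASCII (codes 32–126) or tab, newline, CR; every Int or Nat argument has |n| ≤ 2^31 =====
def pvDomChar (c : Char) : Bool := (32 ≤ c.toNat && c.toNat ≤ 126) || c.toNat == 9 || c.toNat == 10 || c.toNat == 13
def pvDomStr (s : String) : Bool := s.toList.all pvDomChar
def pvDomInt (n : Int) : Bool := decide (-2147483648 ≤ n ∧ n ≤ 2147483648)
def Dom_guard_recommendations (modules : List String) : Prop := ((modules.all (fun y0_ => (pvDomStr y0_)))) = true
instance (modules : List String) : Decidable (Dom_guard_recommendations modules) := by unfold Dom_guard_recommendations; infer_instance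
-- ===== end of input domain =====

-- B replaces A's three any()-scans and seen-set dedup loop with an inverted module→rule
-- index marked in ONE pass over modules, and drops the dedup pass entirely (the six
-- check strings are pairwise distinct, so the assembled list never has duplicates).

-- ===== PORT A =====
def guard_recommendations (modules : List String) : List String :=
  let checks := ["bash ci/check-architecture.sh", "bash ci/check-enterprise-policy.sh"]
  let checks := if modules.any (fun m => (PySem.Set.ofList ["auth", "rbac", "company"]).contains m)
    then checks ++ ["bash ci/check-orchestrator-layer.sh"] else checks
  let checks := if modules.any (fun m => (PySem.Set.ofList ["accounting", "inventory", "invoice", "purchasing"]).contains m)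
    then checks ++ ["bash scripts/gate_reconciliation.sh"] else checks
  let checks := if modules.any (fun m => (PySem.Set.ofList ["orchestrator", "production", "factory"]).contains m)
    then checks ++ ["bash scripts/gate_core.sh"] else checks
  let checks := checks ++ ["bash scripts/gate_fast.sh"]
  -- the dedup loop: for check in checks: if check in seen: continue; seen.add; deduped.append
  (checks.foldl
    (fun (st : List String × PySem.Set String) check =>
      if st.2.contains check then st else (st.1 ++ [check], st.2.add check))
    ([], PySem.Set.empty)).1

-- ===== PORT B =====
-- _RULE_OF : module name -> index of the rule it triggers
def pvRuleOf : PySem.Dict String Int :=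
  PySem.Dict.mk [("auth", 0), ("rbac", 0), ("company", 0),
                 ("accounting", 1), ("inventory", 1), ("invoice", 1), ("purchasing", 1),
                 ("orchestrator", 2), ("production", 2), ("factory", 2)]

def pvRuleCheck : List String :=
  ["bash ci/check-orchestrator-layer.sh",
   "bash scripts/gate_reconciliation.sh",
   "bash scripts/gate_core.sh"]

-- one loop body: i = _RULE_OF.get(m); if i is not None: hit[i] = True
-- (dict values are the literals 0/1/2, in range for the 3-slot list, so .set i.toNat is exact)
def pvMark (hit : List Bool) (m : String) : List Bool :=
  match PySem.Dict.get? pvRuleOf m with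
  | none => hit
  | some i => hit.set i.toNat true

def guard_recommendations_alt (modules : List String) : List String :=
  let hit := modules.foldl pvMark [false, false, false]
  let out := ["bash ci/check-architecture.sh", "bash ci/check-enterprise-policy.sh"]
  let out := (hit.zip pvRuleCheck).foldl
    (fun out hc => if hc.1 then out ++ [hc.2] else out) out
  out ++ ["bash scripts/gate_fast.sh"]

-- ===== PRECONDITION & SPEC =====
def Spec_guard_recommendations (modules : List String) (out : List String) : Prop := out = guard_recommendations_alt modules
instance (modules : List String) (out : List String) : Decidable (Spec_guard_recommendations modules out) := by unfold Spec_guard_recommendations; infer_instance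

-- ===== CLAIM (what is proved, stated in full; the proofs are below) =====
def Claim_equal_guard_recommendations : Prop := ∀ (modules : List String), Dom_guard_recommendations modules → Spec_guard_recommendations modules (guard_recommendations modules)

-- ===== LEMMAS AND PROOFS =====

-- A's seen-set loop keeps the invariant "deduped list = seen set (as a list)".
theorem pvLoopInv (xs : List String) (s : PySem.Set String) :
    xs.foldl
      (fun (st : List String × PySem.Set String) check =>
        if st.2.contains check then st else (st.1 ++ [check], st.2.add check))
      (s, s)
    = (xs.foldl PySem.Set.add s, xs.foldl PySem.Set.add s) := by
  induction xs generalizing s with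
  | nil => rfl
  | cons x xs ih =>
    have hf : (if (s, s).2.contains x = true then (s, s)
          else ((s, s).1 ++ [x], (s, s).2.add x))
        = (PySem.Set.add s x, PySem.Set.add s x) := by
      by_cases h : x ∈ s <;> simp [PySem.Set.add, h]
    rw [List.foldl_cons, hf, List.foldl_cons]
    exact ih (PySem.Set.add s x)

-- A's dedup loop is list(dict.fromkeys(xs)).
theorem pvLoopDedup (xs : List String) :
    (xs.foldl
      (fun (st : List String × PySem.Set String) check =>
        if st.2.contains check then st else (st.1 ++ [check], st.2.add check))
      ([], PySem.Set.empty)).1 = PySem.List.dedup xs := by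
  have h := pvLoopInv xs []
  simp only [PySem.Set.empty] at *
  rw [h]
  simp [PySem.List.dedup_eq_ofList, PySem.Set.ofList_eq_foldl]

-- one dict-marking step flips exactly the flag of the trigger set containing m
theorem pvMarkEq (b1 b2 b3 : Bool) (m : String) :
    pvMark [b1, b2, b3] m =
      [b1 || (PySem.Set.ofList ["auth", "rbac", "company"]).contains m,
       b2 || (PySem.Set.ofList ["accounting", "inventory", "invoice", "purchasing"]).contains m,
       b3 || (PySem.Set.ofList ["orchestrator", "production", "factory"]).contains m] := by
  by_cases h1 : m = "auth";  · subst h1; simp [pvMark, pvRuleOf, PySem.Dict.get?]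
  by_cases h2 : m = "rbac";  · subst h2; simp [pvMark, pvRuleOf, PySem.Dict.get?]
  by_cases h3 : m = "company";  · subst h3; simp [pvMark, pvRuleOf, PySem.Dict.get?]
  by_cases h4 : m = "accounting";  · subst h4; simp [pvMark, pvRuleOf, PySem.Dict.get?]
  by_cases h5 : m = "inventory";  · subst h5; simp [pvMark, pvRuleOf, PySem.Dict.get?]
  by_cases h6 : m = "invoice";  · subst h6; simp [pvMark, pvRuleOf, PySem.Dict.get?]
  by_cases h7 : m = "purchasing";  · subst h7; simp [pvMark, pvRuleOf, PySem.Dict.get?]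
  by_cases h8 : m = "orchestrator";  · subst h8; simp [pvMark, pvRuleOf, PySem.Dict.get?]
  by_cases h9 : m = "production";  · subst h9; simp [pvMark, pvRuleOf, PySem.Dict.get?]
  by_cases h10 : m = "factory";  · subst h10; simp [pvMark, pvRuleOf, PySem.Dict.get?]
  have hn : PySem.Dict.get? pvRuleOf m = none := by
    simp [pvRuleOf, Ne.symm h1, Ne.symm h2, Ne.symm h3, Ne.symm h4, Ne.symm h5,
          Ne.symm h6, Ne.symm h7, Ne.symm h8, Ne.symm h9, Ne.symm h10, PySem.Dict.get?]
  simp [pvMark, hn, PySem.Set.contains, h1, h2, h3, h4, h5, h6, h7, h8, h9, h10]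

-- the marking pass over modules computes the three any()-conditions of A
theorem pvFoldHit (ms : List String) (b1 b2 b3 : Bool) :
    ms.foldl pvMark [b1, b2, b3] =
      [b1 || ms.any (fun m => (PySem.Set.ofList ["auth", "rbac", "company"]).contains m),
       b2 || ms.any (fun m => (PySem.Set.ofList ["accounting", "inventory", "invoice", "purchasing"]).contains m),
       b3 || ms.any (fun m => (PySem.Set.ofList ["orchestrator", "production", "factory"]).contains m)] := by
  induction ms generalizing b1 b2 b3 with
  | nil => simp
  | cons x xs ih =>
    rw [List.foldl_cons, pvMarkEq, ih]
    simp [Bool.or_assoc]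

-- ===== VERDICT (by name: the statement is the Claim_ definition above) =====
theorem guard_recommendations_spec : Claim_equal_guard_recommendations := by
  intro modules _
  unfold Spec_guard_recommendations guard_recommendations guard_recommendations_alt
  rw [pvLoopDedup]
  simp only [pvFoldHit, Bool.false_or]
  rcases h1 : modules.any (fun m => (PySem.Set.ofList ["auth", "rbac", "company"]).contains m) <;>
  rcases h2 : modules.any (fun m => (PySem.Set.ofList ["accounting", "inventory", "invoice", "purchasing"]).contains m) <;>
  rcases h3 : modules.any (fun m => (PySem.Set.ofList ["orchestrator", "production", "factory"]).contains m) <;>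
    simp [h1, h2, h3] <;> rfl
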